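-- pv_equiv track=rewrite | github.com/Ajay-Ram-Rana/DSA | Q8.py | greater
-- ===== SOURCE A (Python) =====
-- def greater(A):
--   n  = len(A)
--   numbers = 0
--   prev = float('-inf')
--   for num in A:
--     num_count = 0
--     for m in A:
--       if m > num:
--         num_count = num_count+1
--     if num_count!=0:
--       numbers = numbers+1
--   return numbers
-- ===== SOURCE B (Python) =====
-- def greater(A):
--     if not A:
--         return 0
--     m = max(A)
--     return sum(1 for x in A if x < m)
-- ===== Notes on version B (the rewrite author's own statement) =====
-- stated objective: faster
-- what changed: B computes the maximum once and counts elements strictly below it in one pass, instead of A's nested per-element scan counting greater elements.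
import Mathlib
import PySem

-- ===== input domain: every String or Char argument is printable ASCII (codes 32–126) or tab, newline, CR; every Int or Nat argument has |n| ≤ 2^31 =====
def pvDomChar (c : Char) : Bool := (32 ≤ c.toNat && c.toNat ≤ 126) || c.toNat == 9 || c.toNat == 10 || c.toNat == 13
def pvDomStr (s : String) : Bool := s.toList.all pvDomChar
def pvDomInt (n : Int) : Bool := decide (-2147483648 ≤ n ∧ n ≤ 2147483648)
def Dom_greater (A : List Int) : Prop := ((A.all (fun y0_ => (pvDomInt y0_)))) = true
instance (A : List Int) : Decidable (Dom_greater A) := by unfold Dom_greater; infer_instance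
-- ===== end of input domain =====

-- B computes max(A) once and counts elements strictly below it in one pass (faster in a timing run); A does a nested per-element scan.

-- ===== PORT A =====
def greater (A : List Int) : Int :=
  A.foldl (fun numbers num =>
    let num_count : Int := A.foldl (fun c m => if m > num then c + 1 else c) 0
    if num_count ≠ 0 then numbers + 1 else numbers) 0

-- ===== PORT B =====
def greater_alt (A : List Int) : Int :=
  match PySem.List.max? A (fun x => x) with
  | none => 0
  | some m => A.foldl (fun s x => if x < m then s + 1 else s) 0

-- ===== PRECONDITION & SPEC =====
def Spec_greater (A : List Int) (out : Int) : Prop := out = greater_alt A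
instance (A : List Int) (out : Int) : Decidable (Spec_greater A out) := by unfold Spec_greater; infer_instance

-- ===== CLAIM (what is proved, stated in full; the proofs are below) =====
def Claim_equal_greater : Prop := ∀ (A : List Int), Dom_greater A → Spec_greater A (greater A)

-- ===== LEMMAS AND PROOFS =====

-- a conditional-increment fold counts the satisfying elements
theorem foldl_count (p : Int → Prop) [DecidablePred p] (L : List Int) (init : Int) :
    L.foldl (fun c x => if p x then c + 1 else c) init
      = init + ((L.filter (fun x => decide (p x))).length : Int) := by
  induction L generalizing init with
  | nil => simp
  | cons a t ih =>
    simp only [List.foldl_cons, List.filter_cons]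
    by_cases h : p a
    · simp [h, ih]; ring
    · simp [h, ih]

theorem greater_spec_aux (A : List Int) : greater A = greater_alt A := by
  unfold greater greater_alt
  cases hM : PySem.List.max? A (fun x => x) with
  | none =>
    have hA : A = [] := (PySem.List.max?_eq_none_iff _ _).1 hM
    simp [hA]
  | some M =>
    have hMmem : M ∈ A := PySem.List.max?_mem hM
    have hMmax : ∀ y ∈ A, y ≤ M := fun y hy => PySem.List.max?_isMax hM y hy
    dsimp only
    rw [foldl_count (fun num => (A.foldl (fun c m => if m > num then c + 1 else c) 0 : Int) ≠ 0) A 0,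
        foldl_count (fun x => x < M) A 0]
    congr 2
    apply congrArg List.length
    apply List.filter_congr
    intro x hx
    simp only [decide_eq_decide]
    rw [foldl_count (fun m => m > x) A 0]
    constructor
    · intro h
      have hne : (A.filter (fun m => decide (m > x))) ≠ [] := by
        intro hnil; simp [hnil] at h
      obtain ⟨m, hm⟩ := List.exists_mem_of_ne_nil _ hne
      have := List.of_mem_filter hm
      have hmA := List.mem_of_mem_filter hm
      have hxm : x < m := by simpa using this
      exact lt_of_lt_of_le hxm (hMmax m hmA)
    · intro hxM
      have hMf : M ∈ A.filter (fun m => decide (m > x)) :=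
        List.mem_filter.2 ⟨hMmem, by simpa using hxM⟩
      have : 0 < (A.filter (fun m => decide (m > x))).length := List.length_pos_of_mem hMf
      omega

-- ===== VERDICT (by name: the statement is the Claim_ definition above) =====
theorem greater_spec : Claim_equal_greater := by
  intro A _
  unfold Spec_greater
  exact greater_spec_aux A
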